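-- pv_equiv track=rewrite | github.com/Andy-Zhou2/AlphaGo_Board_Game | gobang_board.py | check_diagonal_connection_up_left_to_down_right
-- ===== SOURCE A (Python) =====
-- def check_diagonal_connection_up_left_to_down_right(board, length):
--     """
--     checks if there is any connection of length "length" in the upper left diagonal
--     returns True if such connection found
--     :param board: the board to check
--     :param length: the length of the connection
--     :return:
--     """
--     for s in range(15 - length + 1):
--         for t in range(15 - length + 1):
--             for i in range(length):
--                 if board[s + i, t + i] != 1:
--                     break
--             else:
--                 return True
--     return False
-- ===== SOURCE B (Python) =====
-- def check_diagonal_connection_up_left_to_down_right(board, length):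
--     """Single pass along each down-right diagonal with a running counter of
--     consecutive 1s, instead of re-scanning every fixed-size window."""
--     if length <= 0:
--         return True
--     if length > 15:
--         return False  # no run longer than a diagonal fits on a 15x15 board
--     starts = [(r, 0) for r in range(15)] + [(0, c) for c in range(1, 15)]
--     for r, c in starts:
--         count = 0
--         while r < 15 and c < 15:
--             if board[r, c] == 1:
--                 count += 1
--                 if count >= length:
--                     return True
--             else:
--                 count = 0
--             r += 1
--             c += 1
--     return False
-- ===== Notes on version B (the rewrite author's own statement) =====
-- stated objective: alternative
-- what changed: Replaces the triple-nested rescan of every length-sized window with a single pass along each down-right diagonal keeping a running count of consecutive 1s (reset on non-1, succeed when the count reaches length).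
-- outside the precondition, e.g. on check_diagonal_connection_up_left_to_down_right({(0, 0): 0, (0, 1): 1, (1, 2): 1}, 2): A returns True, B raises KeyError
import Mathlib
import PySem

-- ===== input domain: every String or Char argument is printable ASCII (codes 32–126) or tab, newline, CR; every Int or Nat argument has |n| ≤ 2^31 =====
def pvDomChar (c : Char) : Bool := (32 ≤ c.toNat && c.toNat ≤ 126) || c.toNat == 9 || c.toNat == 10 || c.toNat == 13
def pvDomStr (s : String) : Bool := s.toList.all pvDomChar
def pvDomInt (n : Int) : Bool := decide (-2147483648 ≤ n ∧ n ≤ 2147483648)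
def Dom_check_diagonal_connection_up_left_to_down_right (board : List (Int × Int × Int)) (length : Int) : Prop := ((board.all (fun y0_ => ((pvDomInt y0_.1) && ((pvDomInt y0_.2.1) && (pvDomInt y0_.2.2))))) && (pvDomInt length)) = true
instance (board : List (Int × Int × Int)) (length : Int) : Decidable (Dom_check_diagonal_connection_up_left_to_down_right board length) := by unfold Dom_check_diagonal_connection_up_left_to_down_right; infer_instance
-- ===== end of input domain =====

-- B replaces A's rescan of every length-sized window with one pass per down-right
-- diagonal keeping a running count of consecutive 1s (objective: alternative algorithm).

-- ===== PORT A =====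
-- dict[(r,c)] lookup on the association list (first match)
def pvLookup (board : List (Int × Int × Int)) (r c : Int) : Option Int :=
  (board.find? (fun e => e.1 == r && e.2.1 == c)).map (fun e => e.2.2)

-- `for i in range(length)` with for/else: runs to completion (true = the else branch fires)
def pvInnerA (board : List (Int × Int × Int)) (s t : Int) : Int → Nat → Bool
  | _, 0 => true
  | i, fuel + 1 =>
      if pvLookup board (s + i) (t + i) == some 1 then pvInnerA board s t (i + 1) fuel
      else false

-- `for t in range(15 - length + 1)`, returning True as soon as a window is all 1s
def pvLoopT (board : List (Int × Int × Int)) (L s : Int) : Int → Nat → Bool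
  | _, 0 => false
  | t, fuel + 1 =>
      if pvInnerA board s t 0 L.toNat then true else pvLoopT board L s (t + 1) fuel

-- `for s in range(15 - length + 1)`
def pvLoopS (board : List (Int × Int × Int)) (L : Int) : Int → Nat → Bool
  | _, 0 => false
  | s, fuel + 1 =>
      if pvLoopT board L s 0 (15 - L + 1).toNat then true else pvLoopS board L (s + 1) fuel

def check_diagonal_connection_up_left_to_down_right (board : List (Int × Int × Int)) (length : Int) : Bool :=
  pvLoopS board length 0 (15 - length + 1).toNat

-- ===== PORT B =====
-- the while loop of Source B; fuel counts its remaining iterations (15 - max r c),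
-- so the `r < 15 and c < 15` condition is exactly `fuel > 0`
def pvRunDiag (board : List (Int × Int × Int)) (length : Int) : Int → Int → Int → Nat → Bool
  | _, _, _, 0 => false
  | r, c, count, fuel + 1 =>
      if pvLookup board r c == some 1 then
        if count + 1 ≥ length then true
        else pvRunDiag board length (r + 1) (c + 1) (count + 1) fuel
      else pvRunDiag board length (r + 1) (c + 1) 0 fuel

def pvStarts : List (Int × Int) :=
  ((List.range 15).map (fun r => ((r : Int), (0 : Int)))) ++
  ((List.range' 1 14).map (fun c => ((0 : Int), (c : Int))))

def check_diagonal_connection_up_left_to_down_right_alt (board : List (Int × Int × Int)) (length : Int) : Bool :=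
  if length ≤ 0 then true
  else if length > 15 then false
  else pvStarts.any (fun p => pvRunDiag board length p.1 p.2 0 (15 - max p.1 p.2).toNat)

-- ===== PRECONDITION & SPEC =====
-- Pre_ excludes, for 1 ≤ length ≤ 15, boards missing some cell of the 15×15 grid:
-- there A raises KeyError or returns depending on its scan order, and B's single
-- diagonal pass raises/returns at different points.
def Pre_check_diagonal_connection_up_left_to_down_right (board : List (Int × Int × Int)) (length : Int) : Prop :=
  length ≤ 0 ∨ 16 ≤ length ∨
    ∀ r ∈ List.range 15, ∀ c ∈ List.range 15, (pvLookup board (r : Int) (c : Int)).isSome = true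
instance (board : List (Int × Int × Int)) (length : Int) : Decidable (Pre_check_diagonal_connection_up_left_to_down_right board length) := by unfold Pre_check_diagonal_connection_up_left_to_down_right; infer_instance

def pvWitness_check_diagonal_connection_up_left_to_down_right : (List (Int × Int × Int)) × Int := ([], 0)

def Spec_check_diagonal_connection_up_left_to_down_right (board : List (Int × Int × Int)) (length : Int) (out : Bool) : Prop := out = check_diagonal_connection_up_left_to_down_right_alt board length
instance (board : List (Int × Int × Int)) (length : Int) (out : Bool) : Decidable (Spec_check_diagonal_connection_up_left_to_down_right board length out) := by unfold Spec_check_diagonal_connection_up_left_to_down_right; infer_instance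

-- ===== CLAIM (what is proved, stated in full; the proofs are below) =====
def Claim_equal_check_diagonal_connection_up_left_to_down_right : Prop := ∀ (board : List (Int × Int × Int)) (length : Int), Dom_check_diagonal_connection_up_left_to_down_right board length → Pre_check_diagonal_connection_up_left_to_down_right board length → Spec_check_diagonal_connection_up_left_to_down_right board length (check_diagonal_connection_up_left_to_down_right board length)

-- ===== LEMMAS AND PROOFS =====

def pvOnes (board : List (Int × Int × Int)) (r c : Int) : Bool := pvLookup board r c == some 1

lemma pvRunDiag_iff (board : List (Int × Int × Int)) (L : Int) (hL : 1 ≤ L) :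
    ∀ (fuel : Nat) (r c count : Int), 0 ≤ count → count < L →
    (pvRunDiag board L r c count fuel = true ↔
      ∃ j n : Nat, j + n ≤ fuel ∧
        (∀ i : Nat, i < n → pvOnes board (r + j + i) (c + j + i) = true) ∧
        ((j = 0 ∧ L ≤ count + n) ∨ (0 < j ∧ L ≤ (n : Int)))) := by
  intro fuel
  induction fuel with
  | zero =>
    intro r c count h0 hlt
    simp only [pvRunDiag]
    constructor
    · intro h; exact absurd h (by simp)
    · rintro ⟨j, n, hjn, _, hd⟩
      exfalso
      have hj : j = 0 := by omega
      have hn : n = 0 := by omega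
      rcases hd with ⟨_, h⟩ | ⟨hj', _⟩
      · subst hn; push_cast at h; omega
      · omega
  | succ fuel ih =>
    intro r c count h0 hlt
    simp only [pvRunDiag]
    by_cases h1 : (pvLookup board r c == some 1) = true
    · rw [if_pos h1]
      by_cases h2 : count + 1 ≥ L
      · rw [if_pos h2]
        constructor
        · intro _
          refine ⟨0, 1, by omega, ?_, Or.inl ⟨rfl, by omega⟩⟩
          intro i hi
          have : i = 0 := by omega
          subst this
          simpa [pvOnes] using h1
        · intro _; rfl
      · rw [if_neg h2]
        rw [ih (r + 1) (c + 1) (count + 1) (by omega) (by omega)]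
        constructor
        · rintro ⟨j, n, hjn, hones, hd⟩
          rcases hd with ⟨hj0, hLn⟩ | ⟨hj, hLn⟩
          · subst hj0
            refine ⟨0, n + 1, by omega, ?_, Or.inl ⟨rfl, by omega⟩⟩
            intro i hi
            cases i with
            | zero => simpa [pvOnes] using h1
            | succ i' =>
              have := hones i' (by omega)
              convert this using 2 <;> push_cast <;> ring
          · refine ⟨j + 1, n, by omega, ?_, Or.inr ⟨by omega, hLn⟩⟩
            intro i hi
            have := hones i hi
            convert this using 2 <;> push_cast <;> ring
        · rintro ⟨j, n, hjn, hones, hd⟩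
          rcases hd with ⟨hj0, hLn⟩ | ⟨hj, hLn⟩
          · subst hj0
            have hn : 1 ≤ n := by omega
            obtain ⟨n', rfl⟩ : ∃ n', n = n' + 1 := ⟨n - 1, by omega⟩
            refine ⟨0, n', by omega, ?_, Or.inl ⟨rfl, by omega⟩⟩
            intro i hi
            have := hones (i + 1) (by omega)
            convert this using 2 <;> push_cast <;> ring
          · obtain ⟨j', rfl⟩ : ∃ j', j = j' + 1 := ⟨j - 1, by omega⟩
            by_cases hj' : j' = 0
            · subst hj'
              refine ⟨0, n, by omega, ?_, Or.inl ⟨rfl, by omega⟩⟩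
              intro i hi
              have := hones i hi
              convert this using 2 <;> push_cast <;> ring
            · refine ⟨j', n, by omega, ?_, Or.inr ⟨by omega, hLn⟩⟩
              intro i hi
              have := hones i hi
              convert this using 2 <;> push_cast <;> ring
    · rw [if_neg h1]
      rw [ih (r + 1) (c + 1) 0 le_rfl (by omega)]
      constructor
      · rintro ⟨j, n, hjn, hones, hd⟩
        rcases hd with ⟨hj0, hLn⟩ | ⟨hj, hLn⟩
        · subst hj0
          refine ⟨1, n, by omega, ?_, Or.inr ⟨by omega, by omega⟩⟩
          intro i hi
          have := hones i hi
          convert this using 2 <;> push_cast <;> ring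
        · refine ⟨j + 1, n, by omega, ?_, Or.inr ⟨by omega, hLn⟩⟩
          intro i hi
          have := hones i hi
          convert this using 2 <;> push_cast <;> ring
      · rintro ⟨j, n, hjn, hones, hd⟩
        rcases hd with ⟨hj0, hLn⟩ | ⟨hj, hLn⟩
        · exfalso
          subst hj0
          have hn : 1 ≤ n := by omega
          have := hones 0 (by omega)
          apply h1
          simpa [pvOnes] using this
        · obtain ⟨j', rfl⟩ : ∃ j', j = j' + 1 := ⟨j - 1, by omega⟩
          by_cases hj' : j' = 0
          · subst hj'
            refine ⟨0, n, by omega, ?_, Or.inl ⟨rfl, by omega⟩⟩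
            intro i hi
            have := hones i hi
            convert this using 2 <;> push_cast <;> ring
          · refine ⟨j', n, by omega, ?_, Or.inr ⟨by omega, hLn⟩⟩
            intro i hi
            have := hones i hi
            convert this using 2 <;> push_cast <;> ring

lemma pvStarts_mem_left {r : Int} (h0 : 0 ≤ r) (h1 : r ≤ 14) : (r, (0 : Int)) ∈ pvStarts := by
  simp [pvStarts]
  exact Or.inl ⟨r.toNat, by omega, by omega⟩

lemma pvStarts_mem_right {c : Int} (h0 : 1 ≤ c) (h1 : c ≤ 14) : ((0 : Int), c) ∈ pvStarts := by
  simp [pvStarts]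
  exact Or.inr ⟨c.toNat, ⟨by omega, by omega⟩, by omega⟩

lemma pvStarts_bounds {p : Int × Int} (hp : p ∈ pvStarts) :
    0 ≤ p.1 ∧ p.1 ≤ 14 ∧ 0 ≤ p.2 ∧ p.2 ≤ 14 ∧ (p.1 = 0 ∨ p.2 = 0) := by
  simp [pvStarts] at hp
  rcases hp with ⟨a, ha, rfl⟩ | ⟨a, ⟨ha1, ha2⟩, rfl⟩
  · exact ⟨by omega, by omega, le_rfl, by omega, Or.inr rfl⟩
  · exact ⟨le_rfl, by omega, by omega, by omega, Or.inl rfl⟩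

lemma alt_iff (board : List (Int × Int × Int)) (L : Int) (hL1 : 1 ≤ L) (hL2 : L ≤ 15) :
    check_diagonal_connection_up_left_to_down_right_alt board L = true ↔
      ∃ p ∈ pvStarts, ∃ j n : Nat, j + n ≤ (15 - max p.1 p.2).toNat ∧ L ≤ (n : Int) ∧
        ∀ i : Nat, i < n → pvOnes board (p.1 + j + i) (p.2 + j + i) = true := by
  unfold check_diagonal_connection_up_left_to_down_right_alt
  rw [if_neg (by omega : ¬ L ≤ 0), if_neg (by omega : ¬ L > 15), List.any_eq_true]
  constructor
  · rintro ⟨p, hp, hrun⟩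
    obtain ⟨j, n, hjn, hones, hd⟩ :=
      (pvRunDiag_iff board L hL1 _ p.1 p.2 0 le_rfl (by omega)).mp hrun
    refine ⟨p, hp, j, n, hjn, ?_, ?_⟩
    · rcases hd with ⟨_, h⟩ | ⟨_, h⟩
      · omega
      · exact h
    · intro i hi
      simpa [pvOnes] using hones i hi
  · rintro ⟨p, hp, j, n, hjn, hLn, hones⟩
    refine ⟨p, hp, (pvRunDiag_iff board L hL1 _ p.1 p.2 0 le_rfl (by omega)).mpr
      ⟨j, n, hjn, ?_, ?_⟩⟩
    · intro i hi
      simpa [pvOnes] using hones i hi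
    · by_cases hj : j = 0
      · exact Or.inl ⟨hj, by omega⟩
      · exact Or.inr ⟨by omega, hLn⟩

lemma pvInnerA_iff (board : List (Int × Int × Int)) (s t : Int) :
    ∀ (fuel : Nat) (i : Int),
      (pvInnerA board s t i fuel = true ↔
        ∀ k : Nat, k < fuel → pvOnes board (s + (i + k)) (t + (i + k)) = true) := by
  intro fuel
  induction fuel with
  | zero => intro i; simp [pvInnerA]
  | succ fuel ih =>
    intro i
    simp only [pvInnerA]
    by_cases h1 : (pvLookup board (s + i) (t + i) == some 1) = true
    · rw [if_pos h1, ih (i + 1)]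
      constructor
      · intro hall k hk
        cases k with
        | zero => simpa [pvOnes] using h1
        | succ k' =>
          have := hall k' (by omega)
          convert this using 2 <;> push_cast <;> ring
      · intro hall k hk
        have := hall (k + 1) (by omega)
        convert this using 2 <;> push_cast <;> ring
    · rw [if_neg h1]
      constructor
      · intro h; exact absurd h (by simp)
      · intro hall
        exfalso
        have := hall 0 (by omega)
        apply h1
        simpa [pvOnes] using this

lemma pvLoopT_iff (board : List (Int × Int × Int)) (L s : Int) :
    ∀ (fuel : Nat) (t : Int),
      (pvLoopT board L s t fuel = true ↔
        ∃ k : Nat, k < fuel ∧ pvInnerA board s (t + k) 0 L.toNat = true) := by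
  intro fuel
  induction fuel with
  | zero => intro t; simp [pvLoopT]
  | succ fuel ih =>
    intro t
    simp only [pvLoopT]
    by_cases h1 : pvInnerA board s t 0 L.toNat = true
    · rw [if_pos h1]
      constructor
      · intro _
        refine ⟨0, by omega, ?_⟩
        simpa using h1
      · intro _; rfl
    · rw [if_neg h1, ih (t + 1)]
      constructor
      · rintro ⟨k, hk, hin⟩
        refine ⟨k + 1, by omega, ?_⟩
        have he : t + ((k + 1 : ℕ) : Int) = t + 1 + (k : Int) := by push_cast; ring
        rw [he]; exact hin
      · rintro ⟨k, hk, hin⟩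
        cases k with
        | zero => exact absurd (by simpa using hin) h1
        | succ k' =>
          refine ⟨k', by omega, ?_⟩
          have he : t + 1 + ((k' : ℕ) : Int) = t + ((k' + 1 : ℕ) : Int) := by push_cast; ring
          rw [he]; exact hin

lemma pvLoopS_iff (board : List (Int × Int × Int)) (L : Int) :
    ∀ (fuel : Nat) (s : Int),
      (pvLoopS board L s fuel = true ↔
        ∃ k : Nat, k < fuel ∧ pvLoopT board L (s + k) 0 (15 - L + 1).toNat = true) := by
  intro fuel
  induction fuel with
  | zero => intro s; simp [pvLoopS]
  | succ fuel ih =>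
    intro s
    simp only [pvLoopS]
    by_cases h1 : pvLoopT board L s 0 (15 - L + 1).toNat = true
    · rw [if_pos h1]
      constructor
      · intro _
        refine ⟨0, by omega, ?_⟩
        simpa using h1
      · intro _; rfl
    · rw [if_neg h1, ih (s + 1)]
      constructor
      · rintro ⟨k, hk, hin⟩
        refine ⟨k + 1, by omega, ?_⟩
        have he : s + ((k + 1 : ℕ) : Int) = s + 1 + (k : Int) := by push_cast; ring
        rw [he]; exact hin
      · rintro ⟨k, hk, hin⟩
        cases k with
        | zero => exact absurd (by simpa using hin) h1
        | succ k' =>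
          refine ⟨k', by omega, ?_⟩
          have he : s + 1 + ((k' : ℕ) : Int) = s + ((k' + 1 : ℕ) : Int) := by push_cast; ring
          rw [he]; exact hin

lemma a_iff (board : List (Int × Int × Int)) (L : Int) (hL1 : 1 ≤ L) (hL2 : L ≤ 15) :
    check_diagonal_connection_up_left_to_down_right board L = true ↔
      ∃ s t : Int, 0 ≤ s ∧ s < 16 - L ∧ 0 ≤ t ∧ t < 16 - L ∧
        ∀ i : Nat, (i : Int) < L → pvOnes board (s + i) (t + i) = true := by
  unfold check_diagonal_connection_up_left_to_down_right
  rw [pvLoopS_iff]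
  constructor
  · rintro ⟨ks, hks, hT⟩
    obtain ⟨kt, hkt, hin⟩ := (pvLoopT_iff board L _ _ _).mp hT
    have hall := (pvInnerA_iff board _ _ _ _).mp hin
    refine ⟨(ks : Int), (kt : Int), by omega, by omega, by omega, by omega, ?_⟩
    intro i hi
    have := hall i (by omega)
    convert this using 2 <;> omega
  · rintro ⟨s, t, hs0, hs1, ht0, ht1, hall⟩
    refine ⟨s.toNat, by omega, (pvLoopT_iff board L _ _ _).mpr
      ⟨t.toNat, by omega, (pvInnerA_iff board _ _ _ _).mpr ?_⟩⟩
    intro k hk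
    have := hall k (by omega)
    convert this using 2 <;> omega

lemma bridge (board : List (Int × Int × Int)) (L : Int) (hL1 : 1 ≤ L) (hL2 : L ≤ 15) :
    check_diagonal_connection_up_left_to_down_right board L =
    check_diagonal_connection_up_left_to_down_right_alt board L := by
  have hiff : check_diagonal_connection_up_left_to_down_right board L = true ↔
      check_diagonal_connection_up_left_to_down_right_alt board L = true := by
    rw [a_iff board L hL1 hL2, alt_iff board L hL1 hL2]
    constructor
    · rintro ⟨s, t, hs0, hs1, ht0, ht1, hall⟩
      by_cases hst : t ≤ s
      · refine ⟨(s - t, 0), pvStarts_mem_left (by omega) (by omega), t.toNat, L.toNat,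
          ?_, by omega, ?_⟩
        · have hm : max (s - t) (0 : Int) = s - t := max_eq_left (by omega)
          rw [hm]; omega
        · intro i hi
          have := hall i (by omega)
          convert this using 2 <;> omega
      · refine ⟨(0, t - s), pvStarts_mem_right (by omega) (by omega), s.toNat, L.toNat,
          ?_, by omega, ?_⟩
        · have hm : max (0 : Int) (t - s) = t - s := max_eq_right (by omega)
          rw [hm]; omega
        · intro i hi
          have := hall i (by omega)
          convert this using 2 <;> omega
    · rintro ⟨p, hp, j, n, hjn, hLn, hones⟩
      obtain ⟨hp1, hp2, hp3, hp4, hz⟩ := pvStarts_bounds hp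
      have hfuel : ((15 - max p.1 p.2).toNat : Int) = 15 - max p.1 p.2 := by
        rcases hz with h | h <;> rw [h] <;> simp <;> omega
      have hmax1 : p.1 ≤ max p.1 p.2 := le_max_left _ _
      have hmax2 : p.2 ≤ max p.1 p.2 := le_max_right _ _
      refine ⟨p.1 + j, p.2 + j, by omega, by omega, by omega, by omega, ?_⟩
      intro i hi
      exact hones i (by omega)
  cases hA : check_diagonal_connection_up_left_to_down_right board L with
  | true => exact (hiff.mp hA).symm
  | false =>
    cases hB : check_diagonal_connection_up_left_to_down_right_alt board L with
    | true => exact absurd (hiff.mpr hB) (Bool.eq_false_iff.mp hA)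
    | false => rfl

-- ===== VERDICT (by name: the statement is the Claim_ definition above) =====
theorem check_diagonal_connection_up_left_to_down_right_spec : Claim_equal_check_diagonal_connection_up_left_to_down_right := by
  intro board length _ hpre
  unfold Spec_check_diagonal_connection_up_left_to_down_right
  by_cases hle : length ≤ 0
  · have hA : check_diagonal_connection_up_left_to_down_right board length = true := by
      unfold check_diagonal_connection_up_left_to_down_right
      rw [pvLoopS_iff]
      refine ⟨0, by omega, (pvLoopT_iff board length _ _ _).mpr ⟨0, by omega, ?_⟩⟩
      have h0 : length.toNat = 0 := by omega
      rw [h0]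
      simp [pvInnerA]
    rw [hA]
    unfold check_diagonal_connection_up_left_to_down_right_alt
    rw [if_pos hle]
  · by_cases hge : 16 ≤ length
    · have hA : check_diagonal_connection_up_left_to_down_right board length = false := by
        unfold check_diagonal_connection_up_left_to_down_right
        have h0 : (15 - length + 1).toNat = 0 := by omega
        rw [h0]
        rfl
      rw [hA]
      unfold check_diagonal_connection_up_left_to_down_right_alt
      rw [if_neg hle, if_pos (by omega : length > 15)]
    · exact bridge board length (by omega) (by omega)
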